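-- pv_equiv track=rewrite | github.com/ggalfi/qubla | pypkg/qubla/compiler.py | transposeTbl
-- ===== SOURCE A (Python) =====
-- def transposeTbl(tbl, nin, nout):
--     invecs = [0]*nin
--     outvecs = [0]*nout
--     for i in range(1<<nin):
--         for k in range(nin):
--             invecs[k] |= ((i >> k) & 1) << i
--         for k in range(nout):
--             outvecs[k] |= ((tbl[i] >> k) & 1) << i
--     return (invecs, outvecs)
-- ===== SOURCE B (Python) =====
-- def transposeTbl(tbl, nin, nout):
--     n = 1 << nin
--     # input columns by closed form: one period mask replicated across 2^nin bits
--     invecs = [(((1 << (1 << k)) - 1) << (1 << k)) *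
--               (((1 << n) - 1) // ((1 << (1 << (k + 1))) - 1))
--               for k in range(nin)]
--     outvecs = [sum(((tbl[i] >> k) & 1) << i for i in range(n))
--                for k in range(nout)]
--     return (invecs, outvecs)
-- ===== Notes on version B (the rewrite author's own statement) =====
-- stated objective: faster
-- what changed: Replaces A's fused per-row loop that ORs one bit into every column with a closed-form period*stamp bit-pattern construction for the input columns (no per-row loop at all) and independent per-column sums for the output columns.
import Mathlib
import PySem

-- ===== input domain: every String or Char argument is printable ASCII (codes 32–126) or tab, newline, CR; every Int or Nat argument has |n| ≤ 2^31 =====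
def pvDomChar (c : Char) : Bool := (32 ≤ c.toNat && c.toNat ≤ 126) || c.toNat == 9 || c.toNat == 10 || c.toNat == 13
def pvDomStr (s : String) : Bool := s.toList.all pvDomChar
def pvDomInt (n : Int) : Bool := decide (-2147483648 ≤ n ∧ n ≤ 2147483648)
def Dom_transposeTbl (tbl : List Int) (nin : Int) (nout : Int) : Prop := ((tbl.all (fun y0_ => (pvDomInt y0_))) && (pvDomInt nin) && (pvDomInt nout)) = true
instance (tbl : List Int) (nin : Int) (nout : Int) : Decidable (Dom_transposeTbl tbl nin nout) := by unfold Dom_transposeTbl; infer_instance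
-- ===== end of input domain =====

-- B replaces A's fused iterate-and-OR loop by a closed-form period*stamp construction of the
-- input columns and independent per-column sums for the output columns (objective: alternative).

-- '(x >> k) & 1' exactly as both Pythons write it (exact, also for negative x)
def pyBit (x : Int) (k : Nat) : Int := PySem.Int.band (x >>> k) 1

-- ===== PORT A =====
-- Literal port of A: [0]*nin / [0]*nout, then the fused loop over i in range(1<<nin) doing
-- in-place '|=' updates. 'nin.toNat' matches '[0]*nin' (empty for negative nin; '1<<nin'
-- raises for nin<0, excluded by Pre_). 'tbl.getD i 0' is 'tbl[i]': whenever the nout-loop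
-- actually reads it (nout>0), Pre_ guarantees i is in range.
def transposeTbl (tbl : List Int) (nin : Int) (nout : Int) : List Int × List Int :=
  (List.range (1 <<< nin.toNat)).foldl
    (fun st (i : Nat) =>
      ((List.range nin.toNat).foldl
          (fun v k => v.set k (PySem.Int.bor (v.getD k 0) (pyBit (i : Int) k <<< i))) st.1,
       (List.range nout.toNat).foldl
          (fun v k => v.set k (PySem.Int.bor (v.getD k 0) (pyBit (tbl.getD i 0) k <<< i))) st.2))
    (List.replicate nin.toNat 0, List.replicate nout.toNat 0)

-- ===== PORT B =====
-- Literal port of B: invecs[k] = one period mask ((1<<(1<<k))-1)<<(1<<k) times the stamp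
-- ((1<<n)-1)//((1<<(1<<(k+1)))-1); outvecs[k] = sum(((tbl[i]>>k)&1)<<i for i in range(n)).
def transposeTbl_alt (tbl : List Int) (nin : Int) (nout : Int) : List Int × List Int :=
  let n : Nat := 1 <<< nin.toNat
  ((List.range nin.toNat).map (fun k =>
      ((((1 : Int) <<< (1 <<< k)) - 1) <<< (1 <<< k)) *
        PySem.Int.floordiv (((1 : Int) <<< n) - 1) (((1 : Int) <<< (1 <<< (k + 1))) - 1)),
   (List.range nout.toNat).map (fun k =>
      (List.range n).foldl (fun acc i => acc + pyBit (tbl.getD i 0) k <<< i) 0))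

-- ===== PRECONDITION & SPEC =====
-- A raises ValueError on nin < 0 ('1 << nin') and IndexError when nout > 0 and tbl has fewer
-- than 2^nin entries ('tbl[i]'); Pre_ excludes exactly those inputs.
def Pre_transposeTbl (tbl : List Int) (nin : Int) (nout : Int) : Prop :=
  0 ≤ nin ∧ (0 < nout → 2 ^ nin.toNat ≤ tbl.length)
instance (tbl : List Int) (nin : Int) (nout : Int) : Decidable (Pre_transposeTbl tbl nin nout) := by
  unfold Pre_transposeTbl; infer_instance
def pvWitness_transposeTbl : List Int × Int × Int := ([1, 2, 0, 3], 2, 2)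

def Spec_transposeTbl (tbl : List Int) (nin : Int) (nout : Int) (out : List Int × List Int) : Prop := out = transposeTbl_alt tbl nin nout
instance (tbl : List Int) (nin : Int) (nout : Int) (out : List Int × List Int) : Decidable (Spec_transposeTbl tbl nin nout out) := by unfold Spec_transposeTbl; infer_instance

-- ===== CLAIM (what is proved, stated in full; the proofs are below) =====
def Claim_equal_transposeTbl : Prop := ∀ (tbl : List Int) (nin : Int) (nout : Int), Dom_transposeTbl tbl nin nout → Pre_transposeTbl tbl nin nout → Spec_transposeTbl tbl nin nout (transposeTbl tbl nin nout)

-- ===== LEMMAS AND PROOFS =====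

-- a column accumulated by '|=' resp. by '+', as a function of how many rows were folded in
def orCol (f : Nat → Int) (n : Nat) : Int :=
  (List.range n).foldl (fun a i => PySem.Int.bor a (f i <<< i)) 0
def addCol (f : Nat → Int) (n : Nat) : Int :=
  (List.range n).foldl (fun a i => a + f i * 2 ^ i) 0

lemma orCol_succ (f : Nat → Int) (n : Nat) :
    orCol f (n + 1) = PySem.Int.bor (orCol f n) (f n <<< n) := by
  simp [orCol, List.range_succ]

lemma addCol_succ (f : Nat → Int) (n : Nat) :
    addCol f (n + 1) = addCol f n + f n * 2 ^ n := by
  simp [addCol, List.range_succ]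

lemma foldl_shift (f : Nat → Int) (n : Nat) :
    (List.range n).foldl (fun a i => a + f i <<< i) 0 = addCol f n := by
  induction n with
  | zero => rfl
  | succ n ih =>
    rw [List.range_succ, List.foldl_append]
    simp only [List.foldl_cons, List.foldl_nil]
    rw [ih, addCol_succ, Int.shiftLeft_eq]

lemma getD_map_range (f : Nat → Int) {M L : Nat} (h : L < M) :
    ((List.range M).map f).getD L 0 = f L := by
  rw [List.getD_eq_getElem _ _ (by simpa using h)]
  simp

lemma set_map_range (f : Nat → Int) {M L : Nat} (h : L < M) (y : Int) :
    ((List.range M).map f).set L y = (List.range M).map fun k => if k = L then y else f k := by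
  apply List.ext_getElem
  · simp
  · intro i h1 h2
    rw [List.getElem_set]
    simp only [List.getElem_map, List.getElem_range]
    by_cases hEq : L = i
    · rw [if_pos hEq, if_pos hEq.symm]
    · rw [if_neg hEq, if_neg (fun hh => hEq hh.symm)]

lemma setFold (t : Nat → Int) (g : Nat → Int) (M : Nat) :
    ∀ L, L ≤ M →
      (List.range L).foldl (fun v k => v.set k (PySem.Int.bor (v.getD k 0) (t k)))
          ((List.range M).map g)
        = (List.range M).map (fun k => if k < L then PySem.Int.bor (g k) (t k) else g k)
  | 0, _ => by simp
  | L + 1, h => by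
    rw [List.range_succ, List.foldl_append]
    simp only [List.foldl_cons, List.foldl_nil]
    rw [setFold t g M L (by omega)]
    have hLM : L < M := by omega
    rw [getD_map_range (fun k => if k < L then PySem.Int.bor (g k) (t k) else g k) hLM]
    rw [if_neg (lt_irrefl L)]
    rw [set_map_range _ hLM]
    apply List.map_congr_left
    intro a ha
    rw [List.mem_range] at ha
    rcases Nat.lt_trichotomy a L with h1 | h1 | h1
    · rw [if_neg (by omega), if_pos h1, if_pos (by omega)]
    · subst h1; rw [if_pos rfl, if_pos (by omega)]
    · rw [if_neg (by omega), if_neg (by omega), if_neg (by omega)]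

lemma stateChar (tbl : List Int) (nin nout : Nat) :
    ∀ n, (List.range n).foldl
      (fun st (i : Nat) =>
        ((List.range nin).foldl
            (fun v k => v.set k (PySem.Int.bor (v.getD k 0) (pyBit (i : Int) k <<< i))) st.1,
         (List.range nout).foldl
            (fun v k => v.set k (PySem.Int.bor (v.getD k 0) (pyBit (tbl.getD i 0) k <<< i))) st.2))
      (List.replicate nin 0, List.replicate nout 0)
    = ((List.range nin).map (fun k => orCol (fun i => pyBit (i : Int) k) n),
       (List.range nout).map (fun k => orCol (fun i => pyBit (tbl.getD i 0) k) n))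
  | 0 => by
    simp only [List.range_zero, List.foldl_nil]
    rw [Prod.mk.injEq]
    constructor <;> simp [orCol, List.map_const']
  | n + 1 => by
    rw [List.range_succ, List.foldl_append]
    simp only [List.foldl_cons, List.foldl_nil]
    rw [stateChar tbl nin nout n]
    dsimp only
    rw [setFold _ _ nin nin le_rfl, setFold _ _ nout nout le_rfl]
    rw [Prod.mk.injEq]
    constructor <;>
      · apply List.map_congr_left
        intro k hk
        rw [List.mem_range] at hk
        rw [if_pos hk, orCol_succ]

lemma or_add (a b : Int) (n : Nat) (ha0 : 0 ≤ a) (ha : a < 2 ^ n) (hb : b = 0 ∨ b = 1) :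
    PySem.Int.bor a (b * 2 ^ n) = a + b * 2 ^ n := by
  rcases hb with rfl | rfl
  · simp
  · rw [one_mul]
    rw [PySem.Int.bor_of_nonneg ha0 (by positivity)]
    have hcast : ((2 ^ n : Nat) : Int) = 2 ^ n := by push_cast; ring
    have h1 : (2 ^ n : Int).toNat = 2 ^ n := by rw [← hcast]; exact Int.toNat_natCast _
    have h2 : a.toNat < 2 ^ n := by omega
    rw [h1]
    have hlor : 2 ^ n + a.toNat = 2 ^ n ||| a.toNat := by
      have := Nat.two_pow_add_eq_or_of_lt (i := n) h2 1
      simpa using this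
    rw [Nat.lor_comm] at hlor
    rw [← hlor]
    push_cast
    omega

lemma orCol_eq_addCol (f : Nat → Int) (hf : ∀ i, f i = 0 ∨ f i = 1) :
    ∀ n, orCol f n = addCol f n ∧ 0 ≤ addCol f n ∧ addCol f n < 2 ^ n
  | 0 => by simp [orCol, addCol]
  | n + 1 => by
    obtain ⟨h1, h2, h3⟩ := orCol_eq_addCol f hf n
    have hp : (0:Int) < 2 ^ n := by positivity
    have hb1 : (0:Int) ≤ f n * 2 ^ n := by
      rcases hf n with h | h <;> rw [h] <;> nlinarith
    have hb2 : f n * 2 ^ n ≤ 2 ^ n := by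
      rcases hf n with h | h <;> rw [h] <;> nlinarith
    refine ⟨?_, ?_, ?_⟩
    · rw [orCol_succ, addCol_succ, h1, Int.shiftLeft_eq, or_add _ _ _ h2 h3 (hf n)]
    · rw [addCol_succ]; linarith
    · rw [addCol_succ, pow_succ]; linarith

lemma pyBit01 (x : Int) (k : Nat) : pyBit x k = 0 ∨ pyBit x k = 1 := by
  unfold pyBit
  rw [PySem.Int.band_one]
  have h1 := PySem.Int.mod_nonneg (x >>> k) (b := 2) (by norm_num)
  have h2 := PySem.Int.mod_lt (x >>> k) (b := 2) (by norm_num)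
  omega

lemma pyBit_natCast (i k : Nat) : pyBit (i : Int) k = ((i / 2 ^ k % 2 : Nat) : Int) := by
  unfold pyBit
  rw [← Int.natCast_shiftRight, show (1 : Int) = ((1 : Nat) : Int) from rfl,
    PySem.Int.band_natCast]
  simp [Nat.shiftRight_eq_div_pow]

lemma pyBit_lt (i k : Nat) (h : i < 2 ^ k) : pyBit (i : Int) k = 0 := by
  rw [pyBit_natCast]
  simp [Nat.div_eq_of_lt h]

lemma pyBit_mid (i k : Nat) (h1 : 2 ^ k ≤ i) (h2 : i < 2 ^ (k + 1)) : pyBit (i : Int) k = 1 := by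
  rw [pyBit_natCast]
  obtain ⟨r, rfl⟩ : ∃ r, i = r + 2 ^ k := ⟨i - 2 ^ k, by omega⟩
  rw [Nat.add_div_right _ (Nat.two_pow_pos k)]
  have hr : r < 2 ^ k := by rw [pow_succ] at h2; omega
  rw [Nat.div_eq_of_lt hr]
  norm_num

lemma pyBit_shift (i k m : Nat) (hk : k < m) :
    pyBit ((i + 2 ^ m : Nat) : Int) k = pyBit (i : Int) k := by
  rw [pyBit_natCast, pyBit_natCast]
  have h2 : 2 ^ m = 2 ^ (m - k) * 2 ^ k := by
    rw [← pow_add]; congr 1; omega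
  rw [h2, Nat.add_mul_div_right _ _ (Nat.two_pow_pos k)]
  have h3 : 2 ^ (m - k) % 2 = 0 := by
    rw [show m - k = (m - k - 1) + 1 by omega, pow_succ]
    exact Nat.mul_mod_left _ _
  generalize i / 2 ^ k = q
  omega

lemma addCol_congr (f g : Nat → Int) (n : Nat) (h : ∀ i, i < n → f i = g i) :
    addCol f n = addCol g n := by
  induction n with
  | zero => rfl
  | succ n ih =>
    rw [addCol_succ, addCol_succ, ih (fun i hi => h i (by omega)), h n (by omega)]

lemma addCol_zero_fn (n : Nat) : addCol (fun _ => (0 : Int)) n = 0 := by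
  induction n with
  | zero => rfl
  | succ n ih => rw [addCol_succ, ih]; ring

lemma addCol_ones (n : Nat) : addCol (fun _ => (1 : Int)) n = 2 ^ n - 1 := by
  induction n with
  | zero => simp [addCol]
  | succ n ih => rw [addCol_succ, ih, pow_succ]; ring

lemma addCol_add (f : Nat → Int) (a b : Nat) :
    addCol f (a + b) = addCol f a + 2 ^ a * addCol (fun i => f (a + i)) b := by
  induction b with
  | zero => simp [addCol]
  | succ b ih =>
    rw [show a + (b + 1) = (a + b) + 1 from rfl, addCol_succ, addCol_succ, ih, pow_add]
    ring

lemma dvd_lemma (k : Nat) : ∀ m, k + 1 ≤ m → ((2:Int) ^ 2 ^ (k + 1) - 1) ∣ ((2:Int) ^ 2 ^ m - 1) := by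
  intro m
  induction m with
  | zero => omega
  | succ m ih =>
    intro h
    rcases Nat.lt_or_ge (k + 1) (m + 1) with h1 | h1
    · have hsq : (2:Int) ^ 2 ^ (m + 1) - 1 = ((2:Int) ^ 2 ^ m - 1) * ((2:Int) ^ 2 ^ m + 1) := by
        rw [show 2 ^ (m + 1) = 2 ^ m * 2 from pow_succ 2 m, pow_mul]
        ring
      rw [hsq]
      exact Dvd.dvd.mul_right (ih (by omega)) _
    · have : k + 1 = m + 1 := by omega
      rw [this]

lemma T_base (k : Nat) :
    addCol (fun i => pyBit (i : Int) k) (2 ^ (k + 1)) = ((2:Int) ^ 2 ^ k - 1) * 2 ^ 2 ^ k := by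
  have h : 2 ^ (k + 1) = 2 ^ k + 2 ^ k := by rw [pow_succ]; omega
  rw [h, addCol_add]
  rw [addCol_congr (fun i => pyBit (i : Int) k) (fun _ => (0 : Int)) _
      (fun i hi => by simpa using pyBit_lt i k hi)]
  rw [addCol_congr (fun i => pyBit ((2 ^ k + i : Nat) : Int) k) (fun _ => (1 : Int)) _
      (fun i hi => by
        simpa using pyBit_mid (2 ^ k + i) k (by omega) (by rw [pow_succ]; omega))]
  rw [addCol_zero_fn, addCol_ones]
  ring

lemma T_step (k m : Nat) (hk : k < m) :
    addCol (fun i => pyBit (i : Int) k) (2 ^ (m + 1))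
      = addCol (fun i => pyBit (i : Int) k) (2 ^ m) * (1 + (2:Int) ^ 2 ^ m) := by
  have h : 2 ^ (m + 1) = 2 ^ m + 2 ^ m := by rw [pow_succ]; omega
  rw [h, addCol_add]
  rw [addCol_congr (fun i => pyBit ((2 ^ m + i : Nat) : Int) k)
      (fun i => pyBit (i : Int) k) _
      (fun i hi => by simpa [Nat.add_comm] using pyBit_shift i k m hk)]
  ring

lemma ident (k : Nat) : ∀ m, k < m →
    addCol (fun i => pyBit (i : Int) k) (2 ^ m) * ((2:Int) ^ 2 ^ (k + 1) - 1)
      = ((2:Int) ^ 2 ^ k - 1) * 2 ^ 2 ^ k * ((2:Int) ^ 2 ^ m - 1) := by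
  intro m
  induction m with
  | zero => omega
  | succ m ih =>
    intro h
    rcases Nat.lt_or_ge k m with h1 | h1
    · have hsq : (2:Int) ^ 2 ^ (m + 1) = ((2:Int) ^ 2 ^ m) ^ 2 := by
        rw [pow_succ 2 m, pow_mul]
      rw [T_step k m h1, hsq]
      linear_combination (1 + (2:Int) ^ 2 ^ m) * ih h1
    · have hkm : m = k := by omega
      subst hkm
      rw [T_base m]

lemma stamp_eq (k m : Nat) (h : k < m) :
    ∃ c : Int, ((2:Int) ^ 2 ^ m - 1) = ((2:Int) ^ 2 ^ (k + 1) - 1) * c ∧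
      PySem.Int.floordiv ((2:Int) ^ 2 ^ m - 1) ((2:Int) ^ 2 ^ (k + 1) - 1) = c := by
  obtain ⟨c, hc⟩ := dvd_lemma k m (by omega)
  have h2 : (2:Int) ≤ 2 ^ 2 ^ (k + 1) := by
    calc (2:Int) = 2 ^ 1 := (pow_one 2).symm
    _ ≤ 2 ^ 2 ^ (k + 1) := by
        apply pow_le_pow_right₀ (by norm_num)
        exact Nat.one_le_two_pow
  have hpos : (0:Int) < 2 ^ 2 ^ (k + 1) - 1 := by linarith
  refine ⟨c, hc, ?_⟩
  rw [PySem.Int.floordiv_eq_ediv_of_pos hpos, hc,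
    Int.mul_ediv_cancel_left _ (ne_of_gt hpos)]

lemma closed (k m : Nat) (h : k < m) :
    addCol (fun i => pyBit (i : Int) k) (2 ^ m)
      = (((2:Int) ^ 2 ^ k - 1) * 2 ^ 2 ^ k) *
          PySem.Int.floordiv ((2:Int) ^ 2 ^ m - 1) ((2:Int) ^ 2 ^ (k + 1) - 1) := by
  obtain ⟨c, hc, hq⟩ := stamp_eq k m h
  rw [hq]
  have h2 : (2:Int) ≤ 2 ^ 2 ^ (k + 1) := by
    calc (2:Int) = 2 ^ 1 := (pow_one 2).symm
    _ ≤ 2 ^ 2 ^ (k + 1) := by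
        apply pow_le_pow_right₀ (by norm_num)
        exact Nat.one_le_two_pow
  have hne : ((2:Int) ^ 2 ^ (k + 1) - 1) ≠ 0 := by intro h0; linarith [h2]
  apply mul_right_cancel₀ hne
  rw [ident k m h, hc]
  ring

-- ===== VERDICT (by name: the statement is the Claim_ definition above) =====
theorem transposeTbl_spec : Claim_equal_transposeTbl := by
  intro tbl nin nout _ _
  show transposeTbl tbl nin nout = transposeTbl_alt tbl nin nout
  unfold transposeTbl transposeTbl_alt
  simp only [Nat.one_shiftLeft]
  rw [stateChar]
  rw [Prod.mk.injEq]
  refine ⟨?_, ?_⟩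
  · apply List.map_congr_left
    intro k hk
    rw [List.mem_range] at hk
    rw [(orCol_eq_addCol _ (fun i => pyBit01 _ _) _).1, closed k nin.toNat hk]
    simp [Int.shiftLeft_eq]

  · apply List.map_congr_left
    intro k _
    rw [(orCol_eq_addCol _ (fun i => pyBit01 _ _) _).1, ← foldl_shift]
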